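-- pv_equiv track=rewrite | github.com/phoenixway/robin_assistant | tests/test_aicocore_ng.py | parse_if
-- ===== SOURCE A (Python) =====
-- def parse_if(lines, pos):
--     find_end = False
--     res = ""
--     while pos < len(lines) and not find_end:
--         if lines[pos].strip() == "<if/>":
--             find_end = True
--         res = res + str(lines[pos])
--         pos = pos + 1
--     if find_end:
--         return res, pos
--     else:
--         raise RuntimeError
-- ===== SOURCE B (Python) =====
-- def parse_if(lines, pos):
--     # find the terminator index first, then build the string in a second pass
--     n = len(lines)
--     end = None
--     i = pos
--     while i < n:
--         if lines[i].strip() == "<if/>":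
--             end = i
--             break
--         i += 1
--     if end is None:
--         raise RuntimeError
--     return "".join(str(lines[j]) for j in range(pos, end + 1)), end + 1
-- ===== Notes on version B (the rewrite author's own statement) =====
-- stated objective: alternative
-- what changed: A accumulates the result string inside one flag-driven while loop; B first scans for the index of the '<if/>' terminator and then builds the result in a separate join over the index range, separating search from string building (and replacing repeated string concatenation by one join).
import Mathlib
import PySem

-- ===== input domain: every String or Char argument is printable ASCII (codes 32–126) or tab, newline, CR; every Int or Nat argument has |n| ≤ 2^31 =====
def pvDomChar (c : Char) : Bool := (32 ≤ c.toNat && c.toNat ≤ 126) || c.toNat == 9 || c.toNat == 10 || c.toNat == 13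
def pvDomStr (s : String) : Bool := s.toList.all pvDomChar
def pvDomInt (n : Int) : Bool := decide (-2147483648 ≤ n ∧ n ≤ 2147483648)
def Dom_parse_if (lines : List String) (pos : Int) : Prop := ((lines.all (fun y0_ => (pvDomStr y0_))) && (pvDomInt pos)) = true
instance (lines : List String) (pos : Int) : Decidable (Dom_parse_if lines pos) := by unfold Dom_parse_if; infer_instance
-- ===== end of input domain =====

-- B separates the search for the '<if/>' terminator from building the result string (find index, then join a slice), instead of A's single flag-driven accumulate loop.


-- ===== PORT A =====
-- the while loop of A, state = (find_end, res, pos)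
def parseIfLoop (lines : List String) (find_end : Bool) (res : String) (pos : Int) : Bool × String × Int :=
  if pos < PySem.List.len lines ∧ find_end = false then
    let cur := PySem.List.pyGetD lines pos ""     -- lines[pos]; in range whenever Python does not raise
    let fe := if PySem.Str.strip cur = "<if/>" then true else find_end
    parseIfLoop lines fe (res ++ cur) (pos + 1)
  else (find_end, res, pos)
termination_by (PySem.List.len lines - pos).toNat
decreasing_by simp [PySem.List.len] at *; omega

def parse_if (lines : List String) (pos : Int) : String × Int :=
  match parseIfLoop lines false "" pos with
  | (find_end, res, p) => if find_end then (res, p) else ("", p)   -- else-branch: Python raises RuntimeError (outside Pre_)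

-- ===== PORT B =====
-- first pass of B: scan for the terminator index
def findIfEnd (lines : List String) (n : Int) (i : Int) : Option Int :=
  if i < n then
    if PySem.Str.strip (PySem.List.pyGetD lines i "") = "<if/>" then some i
    else findIfEnd lines n (i + 1)
  else none
termination_by (n - i).toNat
decreasing_by omega

def parse_if_alt (lines : List String) (pos : Int) : String × Int :=
  match findIfEnd lines (PySem.List.len lines) pos with
  | none => ("", pos)    -- Python raises RuntimeError (outside Pre_)
  | some e =>
      (PySem.Str.join "" ((PySem.List.pyRange pos (e + 1) 1).map
          (fun j => PySem.List.pyGetD lines j "")), e + 1)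

-- ===== PRECONDITION & SPEC =====
-- Pre_ excludes exactly the inputs where A raises: pos below -len(lines) (IndexError on the
-- first access) and inputs with no '<if/>' line at an index ≥ pos (RuntimeError).
def Pre_parse_if (lines : List String) (pos : Int) : Prop :=
  -(lines.length : Int) ≤ pos ∧
  ∃ i ∈ PySem.List.pyRange pos (lines.length : Int) 1,
      PySem.Str.strip (PySem.List.pyGetD lines i "") = "<if/>"
instance (lines : List String) (pos : Int) : Decidable (Pre_parse_if lines pos) := by
  unfold Pre_parse_if; infer_instance

def pvWitness_parse_if : List String × Int := (["a", " <if/> ", "b"], 0)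

def Spec_parse_if (lines : List String) (pos : Int) (out : String × Int) : Prop := out = parse_if_alt lines pos
instance (lines : List String) (pos : Int) (out : String × Int) : Decidable (Spec_parse_if lines pos out) := by unfold Spec_parse_if; infer_instance

-- ===== CLAIM (what is proved, stated in full; the proofs are below) =====
def Claim_equal_parse_if : Prop := ∀ (lines : List String) (pos : Int), Dom_parse_if lines pos → Pre_parse_if lines pos → Spec_parse_if lines pos (parse_if lines pos)

-- ===== LEMMAS AND PROOFS =====

theorem findIfEnd_bounds (lines : List String) (n i e : Int)
    (h : findIfEnd lines n i = some e) : i ≤ e ∧ e < n := by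
  fun_induction findIfEnd lines n i with
  | case1 i hlt hterm => simp_all
  | case2 i hlt hterm ih => have := ih h; omega
  | case3 i hge => simp at h

theorem join_empty_cons (x : String) (L : List String) :
    PySem.Str.join "" (x :: L) = x ++ PySem.Str.join "" L := by
  cases L with
  | nil => simp [PySem.Str.join]
  | cons y ys => simp [PySem.Str.join, PySem.Chars.join_cons_cons]

theorem loop_eq_of_findIfEnd (lines : List String) (e : Int) :
    ∀ (i : Int) (res : String),
      findIfEnd lines (PySem.List.len lines) i = some e →
      parseIfLoop lines false res i =
        (true,
         res ++ PySem.Str.join "" ((PySem.List.pyRange i (e + 1) 1).map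
            (fun j => PySem.List.pyGetD lines j "")),
         e + 1) := by
  intro i
  fun_induction findIfEnd lines (PySem.List.len lines) i with
  | case1 i hlt hs =>
      intro res h
      injection h with h; subst h
      rw [parseIfLoop, if_pos ⟨hlt, rfl⟩]
      rw [parseIfLoop]
      simp [hs, PySem.List.pyRange_one_singleton, PySem.Str.join]
  | case2 i hlt hs ih =>
      intro res h
      have hb := findIfEnd_bounds lines _ (i + 1) e h
      rw [parseIfLoop, if_pos ⟨hlt, rfl⟩]
      simp only [hs, if_false]
      rw [ih _ h]
      rw [PySem.List.pyRange_one_cons (by omega : i < e + 1)]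
      simp [join_empty_cons, String.append_assoc]
  | case3 i hge =>
      intro res h
      exact absurd h (by simp)

theorem pre_findIfEnd (lines : List String) (pos : Int)
    (h : Pre_parse_if lines pos) :
    ∃ e, findIfEnd lines (PySem.List.len lines) pos = some e := by
  obtain ⟨_, j, hj, hsj⟩ := h
  rw [PySem.List.mem_pyRange_one] at hj
  obtain ⟨hj1, hj2⟩ := hj
  revert hj1
  fun_induction findIfEnd lines (PySem.List.len lines) pos with
  | case1 i hlt hs => intro _; exact ⟨i, rfl⟩
  | case2 i hlt hs ih =>
      intro h1
      exact ih (by omega) (by have : j ≠ i := fun hji => hs (hji ▸ hsj); omega)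
  | case3 i hge =>
      intro h1
      exfalso
      simp [PySem.List.len] at hge
      omega

-- ===== VERDICT (by name: the statement is the Claim_ definition above) =====
theorem parse_if_spec : Claim_equal_parse_if := by
  intro lines pos _ hpre
  obtain ⟨e, he⟩ := pre_findIfEnd lines pos hpre
  unfold Spec_parse_if parse_if parse_if_alt
  rw [he, loop_eq_of_findIfEnd lines e pos "" he]
  simp
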